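-- pv_equiv track=rewrite | github.com/boblespatates/kernighan_lin | Partition.py | Calc_Sum_Gain_Max
-- ===== SOURCE A (Python) =====
-- def Calc_Sum_Gain_Max(list_Gain):
--
-- 	Gain = 0
-- 	nb_Permutation = 0
--
-- 	for i in range(len(list_Gain)):
-- 		temps= 0
--
-- 		for j in list_Gain[:i+1]:
-- 			temps = temps + j
--
-- 		if temps > Gain:
-- 			Gain = temps
-- 			nb_Permutation = i+1
-- 	return (Gain,nb_Permutation)
-- ===== SOURCE B (Python) =====
-- def Calc_Sum_Gain_Max(list_Gain):
-- 	running = 0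
-- 	Gain = 0
-- 	nb_Permutation = 0
-- 	for i, x in enumerate(list_Gain):
-- 		running = running + x
-- 		if running > Gain:
-- 			Gain = running
-- 			nb_Permutation = i + 1
-- 	return (Gain, nb_Permutation)
-- ===== Notes on version B (the rewrite author's own statement) =====
-- stated objective: faster
-- what changed: Replaced the nested loop that re-sums the prefix list_Gain[:i+1] from scratch at every i with a single pass that maintains a running prefix-sum accumulator.
import Mathlib
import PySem

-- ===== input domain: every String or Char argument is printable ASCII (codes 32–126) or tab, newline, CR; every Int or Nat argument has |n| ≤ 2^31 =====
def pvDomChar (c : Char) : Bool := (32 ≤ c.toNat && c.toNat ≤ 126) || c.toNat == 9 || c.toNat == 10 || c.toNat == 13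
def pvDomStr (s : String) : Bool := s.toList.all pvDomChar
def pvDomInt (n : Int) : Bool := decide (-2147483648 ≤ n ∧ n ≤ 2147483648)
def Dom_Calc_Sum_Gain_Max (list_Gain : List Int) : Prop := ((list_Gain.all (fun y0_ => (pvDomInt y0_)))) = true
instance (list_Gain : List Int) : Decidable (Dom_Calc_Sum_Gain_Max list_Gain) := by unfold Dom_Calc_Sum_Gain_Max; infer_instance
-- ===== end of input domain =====

-- B replaces A's nested prefix re-summation with a single pass carrying a running prefix-sum accumulator (asymptotically faster).


-- ===== PORT A =====
-- literal transliteration of A: for each i in range(len(list_Gain)), re-sum the slice list_Gain[:i+1]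
def Calc_Sum_Gain_Max (list_Gain : List Int) : List Int :=
  let st :=
    (PySem.List.pyRange 0 (list_Gain.length : Int) 1).foldl
      (fun (st : Int × Int) (i : Int) =>
        let temps := (PySem.List.slice list_Gain none (some (i + 1))).foldl
          (fun temps j => temps + j) 0
        if temps > st.1 then (temps, i + 1) else st)
      (0, 0)
  [st.1, st.2]

-- ===== PORT B =====
-- transliteration of B: one pass over enumerate(list_Gain) carrying (running, Gain, nb_Permutation)
def Calc_Sum_Gain_Max_alt (list_Gain : List Int) : List Int :=
  let st :=
    (PySem.List.enumerate list_Gain 0).foldl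
      (fun (st : Int × Int × Int) (p : Int × Int) =>
        let running := st.1 + p.2
        if running > st.2.1 then (running, running, p.1 + 1) else (running, st.2.1, st.2.2))
      (0, 0, 0)
  [st.2.1, st.2.2]

-- ===== PRECONDITION & SPEC =====
def Spec_Calc_Sum_Gain_Max (list_Gain : List Int) (out : List Int) : Prop := out = Calc_Sum_Gain_Max_alt list_Gain
instance (list_Gain : List Int) (out : List Int) : Decidable (Spec_Calc_Sum_Gain_Max list_Gain out) := by unfold Spec_Calc_Sum_Gain_Max; infer_instance

-- ===== CLAIM (what is proved, stated in full; the proofs are below) =====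
def Claim_equal_Calc_Sum_Gain_Max : Prop := ∀ (list_Gain : List Int), Dom_Calc_Sum_Gain_Max list_Gain → Spec_Calc_Sum_Gain_Max list_Gain (Calc_Sum_Gain_Max list_Gain)

-- ===== LEMMAS AND PROOFS =====

-- A's outer-loop body and B's loop body, named for the invariant lemma
def pvStepA (xs : List Int) (st : Int × Int) (i : Int) : Int × Int :=
  let temps := (PySem.List.slice xs none (some (i + 1))).foldl (fun temps j => temps + j) 0
  if temps > st.1 then (temps, i + 1) else st

def pvStepB (st : Int × Int × Int) (p : Int × Int) : Int × Int × Int :=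
  let running := st.1 + p.2
  if running > st.2.1 then (running, running, p.1 + 1) else (running, st.2.1, st.2.2)

-- invariant: after processing xs, B's running component is xs.sum and its (Gain, nb) pair equals A's state
theorem pv_key (xs : List Int) :
    let a := (PySem.List.pyRange 0 (xs.length : Int) 1).foldl (pvStepA xs) (0, 0)
    let b := (PySem.List.enumerate xs 0).foldl pvStepB (0, 0, 0)
    b.1 = xs.sum ∧ b.2.1 = a.1 ∧ b.2.2 = a.2 := by
  induction xs using List.reverseRecOn with
  | nil => simp [PySem.List.pyRange_one_eq_nil, PySem.List.enumerate_nil]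
  | append_singleton xs x ih =>
    simp only at ih ⊢
    have hlen : ((xs ++ [x]).length : Int) = (xs.length : Int) + 1 := by
      simp
    rw [hlen, PySem.List.pyRange_one_succ_right (by positivity),
        PySem.List.enumerate_append]
    rw [List.foldl_append, List.foldl_append]
    -- the first xs.length steps of A on (xs ++ [x]) coincide with A on xs
    have hcongr :
        (PySem.List.pyRange 0 (xs.length : Int) 1).foldl (pvStepA (xs ++ [x])) (0, 0)
          = (PySem.List.pyRange 0 (xs.length : Int) 1).foldl (pvStepA xs) (0, 0) := by
      apply PySem.List.foldl_congr_mem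
      intro st i hi
      rw [PySem.List.mem_pyRange_one] at hi
      obtain ⟨h0, h1⟩ := hi
      obtain ⟨k, rfl⟩ : ∃ k : Nat, i = (k : Int) := ⟨i.toNat, (Int.toNat_of_nonneg h0).symm⟩
      have hk : k + 1 ≤ xs.length := by exact_mod_cast h1
      unfold pvStepA
      have h1 : ((k : Int) + 1) = ((k + 1 : Nat) : Int) := by push_cast; ring
      rw [h1, PySem.List.slice_to_natCast, PySem.List.slice_to_natCast,
          List.take_append_of_le_length hk]
    rw [hcongr]
    obtain ⟨hr, hg, hn⟩ := ih
    -- the last step on both sides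
    set a := (PySem.List.pyRange 0 (xs.length : Int) 1).foldl (pvStepA xs) (0, 0) with ha
    set b := (PySem.List.enumerate xs 0).foldl pvStepB (0, 0, 0) with hb
    rw [PySem.List.enumerate_cons, PySem.List.enumerate_nil]
    simp only [List.foldl_cons, List.foldl_nil]
    unfold pvStepA pvStepB
    have hslice : PySem.List.slice (xs ++ [x]) none (some ((xs.length : Int) + 1))
        = xs ++ [x] := by
      have h2 : ((xs.length : Int) + 1) = (((xs ++ [x]).length : Nat) : Int) := by simp
      rw [h2, PySem.List.slice_to_natCast, List.take_length]
    rw [hslice, PySem.List.foldl_add]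
    simp only [List.map_id', List.sum_append, List.sum_cons, List.sum_nil,
      zero_add, add_zero]
    rw [hr, hg, hn]
    split_ifs with h
    · simp
    · simp

-- ===== VERDICT (by name: the statement is the Claim_ definition above) =====
theorem Calc_Sum_Gain_Max_spec : Claim_equal_Calc_Sum_Gain_Max := by
  intro xs _
  unfold Spec_Calc_Sum_Gain_Max Calc_Sum_Gain_Max Calc_Sum_Gain_Max_alt
  have h := pv_key xs
  simp only at h
  obtain ⟨_, hg, hn⟩ := h
  show [_, _] = [_, _]
  rw [show (fun (st : Int × Int) (i : Int) =>
        let temps := (PySem.List.slice xs none (some (i + 1))).foldl (fun temps j => temps + j) 0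
        if temps > st.1 then (temps, i + 1) else st) = pvStepA xs from rfl,
      show (fun (st : Int × Int × Int) (p : Int × Int) =>
        let running := st.1 + p.2
        if running > st.2.1 then (running, running, p.1 + 1) else (running, st.2.1, st.2.2)) = pvStepB from rfl]
  rw [← hg, ← hn]
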